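-- pv_equiv track=rewrite | github.com/xinkaichen97/HackerRank | Practices/Frequency_Queries.py | freqQuery
-- ===== SOURCE A (Python) =====
-- from collections import Counter
--
-- def freqQuery(queries):
--     ans = []
--     counts = Counter()  # current count of each element
--     freq = Counter()  # frequency of counts (e.g. 4: 2 means the frequecy of 4 occurs twice), for faster search
--     for query in queries:
--         op, num = query
--         if op == 1:  # add element
--             freq[counts[num]] -= 1  # need to update the freq counter
--             counts[num] += 1
--             freq[counts[num]] += 1
--         elif op == 2:  # delete element (if exists)
--             if counts[num] > 0:
--                 freq[counts[num]] -= 1  # need to update the freq counter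
--                 counts[num] -= 1
--                 freq[counts[num]] += 1
--         elif op == 3:  # find the frequency in freq
--             if freq[num] > 0:
--                 ans.append(1)
--             else:
--                 ans.append(0)
--     return ans
-- ===== SOURCE B (Python) =====
-- def freqQuery(queries):
--     ans = []
--     counts = {}
--     for op, num in queries:
--         if op == 1:
--             counts[num] = counts.get(num, 0) + 1
--         elif op == 2:
--             if counts.get(num, 0) > 0:
--                 counts[num] = counts[num] - 1
--         elif op == 3:
--             ans.append(1 if num > 0 and num in counts.values() else 0)
--     return ans
-- ===== Notes on version B (the rewrite author's own statement) =====
-- stated objective: simpler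
-- what changed: B drops A's maintained frequency-of-counts index (the second Counter) and answers each frequency query by scanning the current multiplicities directly (num in counts.values()), keeping only the counts dict.
import Mathlib
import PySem

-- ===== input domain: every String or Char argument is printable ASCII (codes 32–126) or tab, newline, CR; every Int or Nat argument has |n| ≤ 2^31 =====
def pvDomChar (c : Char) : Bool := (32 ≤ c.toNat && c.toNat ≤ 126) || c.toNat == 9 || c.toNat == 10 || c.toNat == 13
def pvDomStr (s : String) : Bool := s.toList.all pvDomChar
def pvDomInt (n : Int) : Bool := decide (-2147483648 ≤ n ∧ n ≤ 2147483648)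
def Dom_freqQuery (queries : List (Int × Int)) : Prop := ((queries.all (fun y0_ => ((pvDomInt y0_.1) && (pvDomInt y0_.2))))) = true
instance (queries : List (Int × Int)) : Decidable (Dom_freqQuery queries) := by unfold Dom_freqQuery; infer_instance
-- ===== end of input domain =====

-- B keeps only the counts dict and answers type-3 queries by scanning its values; A maintains a
-- second frequency-of-counts Counter. Objective: simpler (no speed claim).

-- ===== PORT A =====
-- state: (ans, counts, freq); Counter reads are getD _ 0, Counter writes are insert
def freqQueryStepA (st : List Int × PySem.Dict Int Int × PySem.Dict Int Int) (q : Int × Int) :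
    List Int × PySem.Dict Int Int × PySem.Dict Int Int :=
  let ans := st.1
  let counts := st.2.1
  let freq := st.2.2
  let op := q.1
  let num := q.2
  if op = 1 then
    let freq1 := freq.insert (counts.getD num 0) (freq.getD (counts.getD num 0) 0 - 1)
    let counts1 := counts.insert num (counts.getD num 0 + 1)
    let freq2 := freq1.insert (counts1.getD num 0) (freq1.getD (counts1.getD num 0) 0 + 1)
    (ans, counts1, freq2)
  else if op = 2 then
    if counts.getD num 0 > 0 then
      let freq1 := freq.insert (counts.getD num 0) (freq.getD (counts.getD num 0) 0 - 1)
      let counts1 := counts.insert num (counts.getD num 0 - 1)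
      let freq2 := freq1.insert (counts1.getD num 0) (freq1.getD (counts1.getD num 0) 0 + 1)
      (ans, counts1, freq2)
    else st
  else if op = 3 then
    (if freq.getD num 0 > 0 then ans ++ [1] else ans ++ [0], counts, freq)
  else st

def freqQuery (queries : List (Int × Int)) : List Int :=
  (queries.foldl freqQueryStepA ([], PySem.Dict.empty, PySem.Dict.empty)).1

-- ===== PORT B =====
-- state: (ans, counts)
def freqQueryStepB (st : List Int × PySem.Dict Int Int) (q : Int × Int) :
    List Int × PySem.Dict Int Int :=
  let ans := st.1
  let counts := st.2
  let op := q.1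
  let num := q.2
  if op = 1 then
    (ans, counts.insert num (counts.getD num 0 + 1))
  else if op = 2 then
    if counts.getD num 0 > 0 then
      (ans, counts.insert num (counts.getD num 0 - 1))
    else st
  else if op = 3 then
    (if 0 < num ∧ num ∈ counts.values then ans ++ [1] else ans ++ [0], counts)
  else st

def freqQuery_alt (queries : List (Int × Int)) : List Int :=
  (queries.foldl freqQueryStepB ([], PySem.Dict.empty)).1

-- ===== PRECONDITION & SPEC =====
def Spec_freqQuery (queries : List (Int × Int)) (out : List Int) : Prop := out = freqQuery_alt queries
instance (queries : List (Int × Int)) (out : List Int) : Decidable (Spec_freqQuery queries out) := by unfold Spec_freqQuery; infer_instance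

-- ===== CLAIM (what is proved, stated in full; the proofs are below) =====
def Claim_equal_freqQuery : Prop := ∀ (queries : List (Int × Int)), Dom_freqQuery queries → Spec_freqQuery queries (freqQuery queries)

-- ===== LEMMAS AND PROOFS =====

-- the coupling invariant between A's state (counts cA, freq fA) and B's counts cB
def FQInv (cA fA cB : PySem.Dict Int Int) : Prop :=
  (∀ n, cA.getD n 0 = cB.getD n 0) ∧
  cB.keys.Nodup ∧
  (∀ n, 0 ≤ cB.getD n 0) ∧
  (∀ x : Int, 1 ≤ x → fA.getD x 0 = (cB.keys.countP (fun k => cB.getD k 0 = x) : Int)) ∧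
  (fA.getD 0 0 = -(cB.keys.countP (fun k => 1 ≤ cB.getD k 0) : Int)) ∧
  (∀ x : Int, x < 0 → fA.getD x 0 = 0)

theorem FQInv_empty : FQInv PySem.Dict.empty PySem.Dict.empty PySem.Dict.empty := by
  refine ⟨fun n => rfl, ?_, fun n => le_refl 0, fun x _ => rfl, rfl, fun x _ => rfl⟩
  simp [PySem.Dict.keys, PySem.Dict.empty]

-- counting with a predicate changed at one element of a nodup list
theorem countP_update_mem {l : List Int} (hnd : l.Nodup) {k : Int} (hk : k ∈ l)
    (p q : Int → Bool) (hagree : ∀ j ∈ l, j ≠ k → p j = q j) :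
    (l.countP q : Int) = (l.countP p : Int) +
      ((if q k then (1 : Int) else 0) - (if p k then (1 : Int) else 0)) := by
  induction l with
  | nil => cases hk
  | cons a t ih =>
    rcases List.nodup_cons.mp hnd with ⟨ha, hndt⟩
    rcases List.mem_cons.mp hk with h | h
    · subst h
      have ht : t.countP p = t.countP q := by
        apply List.countP_congr
        intro j hj
        rw [hagree j (List.mem_cons_of_mem _ hj) (fun e => ha (e ▸ hj))]
      simp only [List.countP_cons, ht]
      push_cast
      by_cases hp : p k <;> by_cases hq : q k <;> simp [hp, hq]
    · have hne : a ≠ k := fun e => ha (e ▸ h)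
      have hpa : p a = q a := hagree a List.mem_cons_self hne
      have := ih hndt h (fun j hj hjk => hagree j (List.mem_cons_of_mem _ hj) hjk)
      simp only [List.countP_cons, hpa]
      push_cast at this ⊢
      by_cases hq : q a <;> simp [hq] <;> omega

-- getD of the dict after an A-style counter bump (insert c (getD c - 1) then insert c' (… + 1))
theorem FQInv_step1 {cA fA cB : PySem.Dict Int Int} (h : FQInv cA fA cB) (num : Int) :
    FQInv (cA.insert num (cA.getD num 0 + 1))
      ((fA.insert (cA.getD num 0) (fA.getD (cA.getD num 0) 0 - 1)).insert
        ((cA.insert num (cA.getD num 0 + 1)).getD num 0)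
        ((fA.insert (cA.getD num 0) (fA.getD (cA.getD num 0) 0 - 1)).getD
          ((cA.insert num (cA.getD num 0 + 1)).getD num 0) 0 + 1))
      (cB.insert num (cB.getD num 0 + 1)) := by
  obtain ⟨hEq, hNod, hPos, hFreq, hF0, hFneg⟩ := h
  set c : Int := cA.getD num 0 with hc
  have hcB : cB.getD num 0 = c := (hEq num).symm
  have hc0 : 0 ≤ c := hcB ▸ hPos num
  have hread : (cA.insert num (c + 1)).getD num 0 = c + 1 := by
    simp [pysem]
  -- the new freq as a function
  have hfA' : ∀ x : Int,
      (((fA.insert c (fA.getD c 0 - 1)).insert ((cA.insert num (c + 1)).getD num 0)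
        ((fA.insert c (fA.getD c 0 - 1)).getD ((cA.insert num (c + 1)).getD num 0) 0 + 1))).getD x 0
      = if x = c + 1 then fA.getD (c + 1) 0 + 1 else if x = c then fA.getD c 0 - 1 else fA.getD x 0 := by
    intro x
    rw [hread]
    simp only [PySem.Dict.getD_insert]
    have hne : ¬ (c + 1 = c) := by omega
    split_ifs <;> rfl
  have hgB : ∀ n, (cB.insert num (cB.getD num 0 + 1)).getD n 0 = if n = num then c + 1 else cB.getD n 0 := by
    intro n; rw [PySem.Dict.getD_insert, hcB]
  have hgBn : (cB.insert num (cB.getD num 0 + 1)).getD num 0 = c + 1 := by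
    rw [hgB num, if_pos rfl]
  refine ⟨?_, ?_, ?_, ?_, ?_, ?_⟩
  · intro n
    simp only [PySem.Dict.getD_insert, hEq n, hcB]
  · exact PySem.Dict.nodup_keys_insert _ _ _ hNod
  · intro n
    rw [hgB n]
    split_ifs with hn
    · omega
    · exact hPos n
  · -- counts-of-counts for x ≥ 1
    intro x hx
    rw [hfA' x]
    by_cases hcont : cB.contains num
    · have hmem : num ∈ cB.keys := (PySem.Dict.contains_iff_mem_keys _ _).mp hcont
      rw [PySem.Dict.keys_insert_of_contains _ _ hcont]
      have hupd := countP_update_mem hNod hmem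
        (fun k => decide (cB.getD k 0 = x))
        (fun k => decide ((cB.insert num (cB.getD num 0 + 1)).getD k 0 = x))
        (by intro j hj hjne; simp [hgB j, hjne])
      rw [hupd, ← hFreq x hx]
      beta_reduce
      rw [hgBn, hcB]
      by_cases h1 : x = c + 1
      · subst h1
        simp only [decide_eq_true_eq]
        split_ifs <;> omega
      · by_cases h2 : x = c
        · subst h2
          simp only [decide_eq_true_eq]
          split_ifs <;> omega
        · simp only [decide_eq_true_eq]
          split_ifs <;> omega
    · have hnm : num ∉ cB.keys := fun hm => by
        simp [(PySem.Dict.contains_iff_mem_keys _ _).mpr hm] at hcont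
      have hcz : cB.getD num 0 = 0 :=
        PySem.Dict.getD_of_not_contains _ _ (by simpa using hcont)
      rw [PySem.Dict.keys_insert_of_not_contains _ _ (by simpa using hcont)]
      rw [List.countP_append]
      have hsame : (cB.keys.countP (fun k => decide ((cB.insert num (cB.getD num 0 + 1)).getD k 0 = x)))
          = cB.keys.countP (fun k => decide (cB.getD k 0 = x)) := by
        apply List.countP_congr
        intro j hj
        have hjne : j ≠ num := fun e => hnm (e ▸ hj)
        simp [hgB j, hjne]
      have hc00 : c = 0 := by rw [← hcB, hcz]
      have hone : List.countP (fun k => decide ((cB.insert num (cB.getD num 0 + 1)).getD k 0 = x)) [num]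
          = if x = c + 1 then 1 else 0 := by
        simp only [List.countP_cons, List.countP_nil, hgBn]
        split_ifs with h1 h2 h3 <;> simp_all
      rw [hsame, hone]
      have hcnt := hFreq x hx
      have hxc : ¬ (x = c) := by omega
      rw [if_neg hxc]
      by_cases h1 : x = c + 1
      · subst h1
        rw [if_pos rfl, if_pos rfl]
        push_cast
        omega
      · rw [if_neg h1, if_neg h1]
        push_cast
        omega
  · -- the 0 bucket
    rw [hfA' 0]
    have h01 : ¬ ((0:Int) = c + 1) := by omega
    rw [if_neg h01]
    by_cases hcont : cB.contains num
    · have hmem : num ∈ cB.keys := (PySem.Dict.contains_iff_mem_keys _ _).mp hcont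
      rw [PySem.Dict.keys_insert_of_contains _ _ hcont]
      have hupd := countP_update_mem hNod hmem
        (fun k => decide (1 ≤ cB.getD k 0))
        (fun k => decide (1 ≤ (cB.insert num (cB.getD num 0 + 1)).getD k 0))
        (by intro j hj hjne; simp [hgB j, hjne])
      rw [hupd]
      beta_reduce
      rw [hgBn, hcB]
      by_cases hc0' : (0:Int) = c
      · rw [if_pos hc0', ← hc0', hF0]
        simp only [decide_eq_true_eq]
        split_ifs <;> omega
      · rw [if_neg hc0', hF0]
        simp only [decide_eq_true_eq]
        split_ifs <;> omega
    · have hnm : num ∉ cB.keys := fun hm => by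
        simp [(PySem.Dict.contains_iff_mem_keys _ _).mpr hm] at hcont
      have hcz : cB.getD num 0 = 0 :=
        PySem.Dict.getD_of_not_contains _ _ (by simpa using hcont)
      have hc00 : c = 0 := by rw [← hcB, hcz]
      rw [PySem.Dict.keys_insert_of_not_contains _ _ (by simpa using hcont)]
      rw [List.countP_append]
      have hsame : (cB.keys.countP (fun k => decide (1 ≤ (cB.insert num (cB.getD num 0 + 1)).getD k 0)))
          = cB.keys.countP (fun k => decide (1 ≤ cB.getD k 0)) := by
        apply List.countP_congr
        intro j hj
        have hjne : j ≠ num := fun e => hnm (e ▸ hj)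
        simp [hgB j, hjne]
      rw [hsame]
      have hone : List.countP (fun k => decide (1 ≤ (cB.insert num (cB.getD num 0 + 1)).getD k 0)) [num] = 1 := by
        simp only [List.countP_cons, List.countP_nil, hgBn]
        simp; omega
      rw [hone, if_pos (by omega : (0:Int) = c), hc00, hF0]
      push_cast
      omega
  · intro x hxneg
    rw [hfA' x, if_neg (by omega), if_neg (by omega)]
    exact hFneg x hxneg

theorem FQInv_step2 {cA fA cB : PySem.Dict Int Int} (h : FQInv cA fA cB) (num : Int)
    (hpos : cA.getD num 0 > 0) :
    FQInv (cA.insert num (cA.getD num 0 - 1))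
      ((fA.insert (cA.getD num 0) (fA.getD (cA.getD num 0) 0 - 1)).insert
        ((cA.insert num (cA.getD num 0 - 1)).getD num 0)
        ((fA.insert (cA.getD num 0) (fA.getD (cA.getD num 0) 0 - 1)).getD
          ((cA.insert num (cA.getD num 0 - 1)).getD num 0) 0 + 1))
      (cB.insert num (cB.getD num 0 - 1)) := by
  obtain ⟨hEq, hNod, hPos, hFreq, hF0, hFneg⟩ := h
  set c : Int := cA.getD num 0 with hc
  have hcB : cB.getD num 0 = c := (hEq num).symm
  have hc1 : 1 ≤ c := by omega
  have hcont : cB.contains num := by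
    by_contra hnc
    have := PySem.Dict.getD_of_not_contains (d := cB) (k := num) (d0 := (0:Int)) (by simpa using hnc)
    omega
  have hmem : num ∈ cB.keys := (PySem.Dict.contains_iff_mem_keys _ _).mp hcont
  have hkeys : (cB.insert num (cB.getD num 0 - 1)).keys = cB.keys :=
    PySem.Dict.keys_insert_of_contains _ _ hcont
  have hread : (cA.insert num (c - 1)).getD num 0 = c - 1 := by
    simp [pysem]
  have hfA' : ∀ x : Int,
      (((fA.insert c (fA.getD c 0 - 1)).insert ((cA.insert num (c - 1)).getD num 0)
        ((fA.insert c (fA.getD c 0 - 1)).getD ((cA.insert num (c - 1)).getD num 0) 0 + 1))).getD x 0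
      = if x = c - 1 then fA.getD (c - 1) 0 + 1 else if x = c then fA.getD c 0 - 1 else fA.getD x 0 := by
    intro x
    rw [hread]
    simp only [PySem.Dict.getD_insert]
    have hne : ¬ (c - 1 = c) := by omega
    split_ifs <;> rfl
  have hgB : ∀ n, (cB.insert num (cB.getD num 0 - 1)).getD n 0 = if n = num then c - 1 else cB.getD n 0 := by
    intro n; rw [PySem.Dict.getD_insert, hcB]
  have hgBn : (cB.insert num (cB.getD num 0 - 1)).getD num 0 = c - 1 := by
    rw [hgB num, if_pos rfl]
  refine ⟨?_, ?_, ?_, ?_, ?_, ?_⟩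
  · intro n
    simp only [PySem.Dict.getD_insert, hEq n, hcB]
  · exact PySem.Dict.nodup_keys_insert _ _ _ hNod
  · intro n
    rw [hgB n]
    split_ifs with hn
    · omega
    · exact hPos n
  · intro x hx
    rw [hfA' x, hkeys]
    have hupd := countP_update_mem hNod hmem
      (fun k => decide (cB.getD k 0 = x))
      (fun k => decide ((cB.insert num (cB.getD num 0 - 1)).getD k 0 = x))
      (by intro j hj hjne; simp [hgB j, hjne])
    rw [hupd, ← hFreq x hx]
    beta_reduce
    rw [hgBn, hcB]
    by_cases h1 : x = c - 1
    · subst h1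
      simp only [decide_eq_true_eq]
      split_ifs <;> omega
    · by_cases h2 : x = c
      · subst h2
        simp only [decide_eq_true_eq]
        split_ifs <;> omega
      · simp only [decide_eq_true_eq]
        split_ifs <;> omega
  · rw [hfA' 0, hkeys]
    have hupd := countP_update_mem hNod hmem
      (fun k => decide (1 ≤ cB.getD k 0))
      (fun k => decide (1 ≤ (cB.insert num (cB.getD num 0 - 1)).getD k 0))
      (by intro j hj hjne; simp [hgB j, hjne])
    rw [hupd]
    beta_reduce
    rw [hgBn, hcB]
    by_cases h1 : (0:Int) = c - 1
    · rw [if_pos h1]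
      have e : c - 1 = 0 := by omega
      rw [e, hF0]
      simp only [decide_eq_true_eq]
      split_ifs <;> omega
    · rw [if_neg h1, if_neg (by omega : ¬ (0:Int) = c), hF0]
      simp only [decide_eq_true_eq]
      split_ifs <;> omega
  · intro x hxneg
    rw [hfA' x]
    by_cases h1 : x = c - 1
    · rw [if_pos h1]
      omega
    · rw [if_neg h1, if_neg (by omega)]
      exact hFneg x hxneg

-- the type-3 answers agree under the invariant
theorem FQInv_query3 {cA fA cB : PySem.Dict Int Int} (h : FQInv cA fA cB) (num : Int) :
    (fA.getD num 0 > 0) ↔ (0 < num ∧ num ∈ cB.values) := by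
  obtain ⟨hEq, hNod, hPos, hFreq, hF0, hFneg⟩ := h
  have hvals : cB.values = cB.keys.map (fun k => cB.getD k 0) :=
    PySem.Dict.values_eq_map_keys cB hNod 0
  constructor
  · intro hgt
    rcases lt_trichotomy num 0 with hn | hn | hn
    · rw [hFneg num hn] at hgt; omega
    · subst hn; rw [hF0] at hgt; omega
    · refine ⟨hn, ?_⟩
      rw [hFreq num (by omega)] at hgt
      have hcp : 0 < cB.keys.countP (fun k => cB.getD k 0 = num) := by exact_mod_cast hgt
      rcases List.countP_pos_iff.mp hcp with ⟨k, hk, hkp⟩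
      rw [hvals]
      exact List.mem_map.mpr ⟨k, hk, by simpa using hkp⟩
  · rintro ⟨hn, hmem⟩
    rw [hvals] at hmem
    rcases List.mem_map.mp hmem with ⟨k, hk, hkv⟩
    rw [hFreq num (by omega)]
    have : 0 < cB.keys.countP (fun k => cB.getD k 0 = num) :=
      List.countP_pos_iff.mpr ⟨k, hk, by simpa using hkv⟩
    exact_mod_cast this

-- main loop invariant
theorem freqQuery_loop (qs : List (Int × Int)) :
    ∀ (ans : List Int) (cA fA cB : PySem.Dict Int Int), FQInv cA fA cB →
      (qs.foldl freqQueryStepA (ans, cA, fA)).1 = (qs.foldl freqQueryStepB (ans, cB)).1 := by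
  induction qs with
  | nil => intro ans cA fA cB _; rfl
  | cons q t ih =>
    intro ans cA fA cB hinv
    simp only [List.foldl_cons]
    obtain ⟨op, num⟩ := q
    show (t.foldl freqQueryStepA (freqQueryStepA (ans, cA, fA) (op, num))).1
        = (t.foldl freqQueryStepB (freqQueryStepB (ans, cB) (op, num))).1
    by_cases h1 : op = 1
    · simp only [freqQueryStepA, freqQueryStepB, h1, if_pos]
      exact ih ans _ _ _ (FQInv_step1 hinv num)
    · by_cases h2 : op = 2
      · simp only [freqQueryStepA, freqQueryStepB, h2, if_pos]
        have hEq := hinv.1 num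
        by_cases hp : cA.getD num 0 > 0
        · rw [if_pos hp, if_pos (by omega : cB.getD num 0 > 0)]
          exact ih ans _ _ _ (FQInv_step2 hinv num hp)
        · rw [if_neg hp, if_neg (by omega : ¬ cB.getD num 0 > 0)]
          exact ih ans _ _ _ hinv
      · by_cases h3 : op = 3
        · simp only [freqQueryStepA, freqQueryStepB, h3, if_pos]
          have hq := FQInv_query3 hinv num
          by_cases hA : fA.getD num 0 > 0
          · rw [if_pos hA, if_pos (hq.mp hA)]
            exact ih _ _ _ _ hinv
          · rw [if_neg hA, if_neg (fun hb => hA (hq.mpr hb))]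
            exact ih _ _ _ _ hinv
        · simp only [freqQueryStepA, freqQueryStepB, if_neg h1, if_neg h2, if_neg h3]
          exact ih ans _ _ _ hinv

-- ===== VERDICT (by name: the statement is the Claim_ definition above) =====
theorem freqQuery_spec : Claim_equal_freqQuery := by
  intro queries _
  unfold Spec_freqQuery freqQuery freqQuery_alt
  exact freqQuery_loop queries [] _ _ _ FQInv_empty
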